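-- pv_equiv track=rewrite | github.com/sjyjytu/elevator_clean2 | smec_liftsim/utils.py | merge_list_to_qtype_floor
-- ===== SOURCE A (Python) =====
-- def merge_list_to_qtype_floor(call, park, flrnum):
--     qtype = []
--     for flr in range(flrnum):
--         if (flr in call) or (flr in park):
--             qtype.append(1)
--         else:
--             qtype.append(0)
--
--     return qtype
-- ===== SOURCE B (Python) =====
-- def merge_list_to_qtype_floor(call, park, flrnum):
--     n = max(flrnum, 0)
--     qtype = [0] * n
--     for x in call:
--         if 0 <= x < n:
--             qtype[x] = 1
--     for x in park:
--         if 0 <= x < n: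
--             qtype[x] = 1
--     return qtype
-- ===== Notes on version B (the rewrite author's own statement) =====
-- stated objective: idiomatic
-- what changed: B preallocates [0]*flrnum and sets qtype[x]=1 for each in-range floor appearing in call or park, instead of scanning every floor and testing list membership.
import Mathlib
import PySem

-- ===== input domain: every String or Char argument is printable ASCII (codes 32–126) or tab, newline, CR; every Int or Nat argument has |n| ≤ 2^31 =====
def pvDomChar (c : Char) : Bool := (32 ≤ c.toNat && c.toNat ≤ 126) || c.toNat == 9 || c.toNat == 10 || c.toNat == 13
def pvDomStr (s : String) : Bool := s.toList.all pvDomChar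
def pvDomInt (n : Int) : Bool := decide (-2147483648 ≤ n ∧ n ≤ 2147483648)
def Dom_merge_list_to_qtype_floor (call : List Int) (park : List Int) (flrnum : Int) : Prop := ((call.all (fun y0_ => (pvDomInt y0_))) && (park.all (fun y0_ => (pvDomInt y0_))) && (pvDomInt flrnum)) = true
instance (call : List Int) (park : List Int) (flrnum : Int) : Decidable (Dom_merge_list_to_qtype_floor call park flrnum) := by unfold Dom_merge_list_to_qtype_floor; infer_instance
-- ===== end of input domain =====

-- B replaces A's scan-every-floor-with-membership-test by a preallocated 0-array with
-- qtype[x] = 1 set once per in-range element of call/park (return value only; no mutation visible to caller).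

-- ===== PORT A =====
-- for flr in range(flrnum): qtype.append(1 if flr in call or flr in park else 0)
def merge_list_to_qtype_floor (call : List Int) (park : List Int) (flrnum : Int) : List Int :=
  (PySem.List.pyRange 0 flrnum 1).foldl
    (fun qtype flr => qtype ++ [if call.contains flr || park.contains flr then (1 : Int) else 0]) []

-- ===== PORT B =====
-- one pass over xs: if 0 <= x < n then qtype[x] = 1
def pvMark (n : Int) (xs : List Int) (qtype : List Int) : List Int :=
  xs.foldl (fun q x => if 0 ≤ x ∧ x < n then q.set x.toNat 1 else q) qtype

def merge_list_to_qtype_floor_alt (call : List Int) (park : List Int) (flrnum : Int) : List Int :=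
  let n := max flrnum 0
  pvMark n park (pvMark n call (List.replicate n.toNat 0))

-- ===== PRECONDITION & SPEC =====
def Spec_merge_list_to_qtype_floor (call : List Int) (park : List Int) (flrnum : Int) (out : List Int) : Prop := out = merge_list_to_qtype_floor_alt call park flrnum
instance (call : List Int) (park : List Int) (flrnum : Int) (out : List Int) : Decidable (Spec_merge_list_to_qtype_floor call park flrnum out) := by unfold Spec_merge_list_to_qtype_floor; infer_instance

-- ===== CLAIM (what is proved, stated in full; the proofs are below) =====
def Claim_equal_merge_list_to_qtype_floor : Prop := ∀ (call : List Int) (park : List Int) (flrnum : Int), Dom_merge_list_to_qtype_floor call park flrnum → Spec_merge_list_to_qtype_floor call park flrnum (merge_list_to_qtype_floor call park flrnum)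

-- ===== LEMMAS AND PROOFS =====

theorem pvMark_length (n : Int) (xs : List Int) (q : List Int) :
    (pvMark n xs q).length = q.length := by
  induction xs generalizing q with
  | nil => rfl
  | cons x xs ih =>
    simp only [pvMark, List.foldl_cons] at *
    split <;> simp [ih, List.length_set]

theorem pvMark_getElem? (n : Int) (xs : List Int) (q : List Int) (i : Nat)
    (hi : i < q.length) (hn : (q.length : Int) = n) :
    (pvMark n xs q)[i]? = if xs.contains (i : Int) then some 1 else q[i]? := by
  induction xs generalizing q with
  | nil => simp [pvMark]
  | cons x xs ih =>
    simp only [pvMark, List.foldl_cons] at *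
    by_cases hx : 0 ≤ x ∧ x < n
    · rw [if_pos hx]
      rw [ih (q.set x.toNat 1) (by simpa using hi) (by simpa using hn)]
      by_cases hxi : x = (i : Int)
      · have ht : x.toNat = i := by omega
        simp [hxi, hi]
      · have hne : x.toNat ≠ i := by omega
        simp [hne, Ne.symm hxi]
    · rw [if_neg hx]
      have hxi : x ≠ (i : Int) := by intro h; exact hx ⟨by omega, by omega⟩
      rw [ih q hi hn]
      simp [Ne.symm hxi]

theorem portA_eq_map (call park : List Int) (flrnum : Int) :
    merge_list_to_qtype_floor call park flrnum =
      (PySem.List.pyRange 0 flrnum 1).map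
        (fun flr => if call.contains flr || park.contains flr then (1 : Int) else 0) := by
  unfold merge_list_to_qtype_floor
  rw [PySem.List.foldl_append_eq_flatMap]
  rw [List.nil_append]
  induction PySem.List.pyRange 0 flrnum 1 with
  | nil => rfl
  | cons a l ih => rw [List.flatMap_cons, List.map_cons, List.singleton_append, ih]

-- ===== VERDICT (by name: the statement is the Claim_ definition above) =====
theorem merge_list_to_qtype_floor_spec : Claim_equal_merge_list_to_qtype_floor := by
  intro call park flrnum _
  show _ = _
  rw [portA_eq_map]
  unfold merge_list_to_qtype_floor_alt
  set n : Int := max flrnum 0 with hn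
  have hrange : PySem.List.pyRange 0 flrnum 1 = PySem.List.pyRange 0 n 1 := by
    by_cases h : flrnum ≤ 0
    · rw [PySem.List.pyRange_one_eq_nil h, PySem.List.pyRange_one_eq_nil (by omega)]
    · congr 1; omega
  rw [hrange]
  have hlen1 : (pvMark n call (List.replicate n.toNat 0)).length = n.toNat := by
    rw [pvMark_length, List.length_replicate]
  have hlen2 : (pvMark n park (pvMark n call (List.replicate n.toNat 0))).length = n.toNat := by
    rw [pvMark_length, hlen1]
  apply List.ext_getElem
  · rw [hlen2, List.length_map, PySem.List.length_pyRange_one]; omega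
  · intro i h1 h2
    have hi : i < n.toNat := by rwa [hlen2] at h2
    have hB : (pvMark n park (pvMark n call (List.replicate n.toNat 0)))[i]? =
        some (if park.contains (i : Int) then 1
              else if call.contains (i : Int) then 1 else 0) := by
      rw [pvMark_getElem? n park _ i (by omega) (by rw [hlen1]; omega)]
      rw [pvMark_getElem? n call _ i (by simpa using hi) (by simp; omega)]
      rw [List.getElem?_replicate]
      by_cases hp : (i : Int) ∈ park <;> by_cases hc : (i : Int) ∈ call <;>
        simp [hp, hc, hi]
    rw [List.getElem?_eq_getElem h2] at hB
    have hBv := Option.some.inj hB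
    rw [hBv, List.getElem_map]
    have hval : (PySem.List.pyRange 0 n 1)[i]'(by rw [PySem.List.length_pyRange_one]; omega)
        = (i : Int) := by
      rw [PySem.List.getElem_pyRange_one]
      omega
    rw [hval]
    by_cases hp : (i : Int) ∈ park <;> by_cases hc : (i : Int) ∈ call <;>
      simp [hp, hc]
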